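-- pv_equiv track=rewrite | github.com/Tempus14/game_night | game_night/scoring.py | tied_rank_groups
-- ===== SOURCE A (Python) =====
-- def tied_rank_groups(
--     ranks_by_team: dict[str, int],
-- ) -> list[tuple[int, list[str]]]:
--     groups: dict[int, list[str]] = {}
--
--     for team_id, rank in ranks_by_team.items():
--         groups.setdefault(rank, []).append(team_id)
--
--     return [
--         (rank, sorted(team_ids))
--         for rank, team_ids in sorted(groups.items())
--         if len(team_ids) > 1
--     ]
-- ===== SOURCE B (Python) =====
-- def tied_rank_groups(
--     ranks_by_team: dict[str, int],
-- ) -> list[tuple[int, list[str]]]: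
--     # Sort once by rank, then split the sorted sequence into maximal runs of
--     # equal rank; emit each run (name-sorted) when it has more than one team.
--     by_rank = sorted(ranks_by_team.items(), key=lambda kv: kv[1])
--
--     runs: list[tuple[int, list[str]]] = []
--     for team_id, rank in by_rank:
--         if runs and runs[-1][0] == rank:
--             runs[-1][1].append(team_id)
--         else:
--             runs.append((rank, [team_id]))
--
--     out: list[tuple[int, list[str]]] = []
--     for rank, teams in runs:
--         teams = sorted(teams)
--         if len(teams) > 1:
--             out.append((rank, teams))
--     return out
-- ===== Notes on version B (the rewrite author's own statement) =====
-- stated objective: alternative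
-- what changed: Replaces A's dict of rank buckets (group-then-sort) with one sort of the items by rank followed by a linear split into maximal runs of equal rank, emitting each name-sorted run that has more than one team.
import Mathlib
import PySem

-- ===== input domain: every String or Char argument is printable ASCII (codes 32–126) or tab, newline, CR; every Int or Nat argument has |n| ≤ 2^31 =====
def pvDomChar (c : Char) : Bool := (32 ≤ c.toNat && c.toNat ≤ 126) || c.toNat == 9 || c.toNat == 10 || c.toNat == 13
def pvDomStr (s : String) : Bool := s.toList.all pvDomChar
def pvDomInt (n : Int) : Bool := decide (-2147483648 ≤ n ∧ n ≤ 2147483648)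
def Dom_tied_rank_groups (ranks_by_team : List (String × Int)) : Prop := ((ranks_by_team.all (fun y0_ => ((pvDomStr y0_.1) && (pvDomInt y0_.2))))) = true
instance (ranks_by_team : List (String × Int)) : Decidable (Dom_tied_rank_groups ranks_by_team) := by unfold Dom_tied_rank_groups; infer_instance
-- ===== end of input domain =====

-- B replaces A's dict of rank buckets by one sort by rank followed by a linear split
-- into maximal runs of equal rank (objective: alternative decomposition, same asymptotic cost).

-- ===== PORT A =====
def tied_rank_groups (ranks_by_team : List (String × Int)) : List (Int × List String) :=
  -- groups.setdefault(rank, []).append(team_id)  ≡  groups[rank] = groups.get(rank, []) + [team_id]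
  let groups : PySem.Dict Int (List String) :=
    ranks_by_team.foldl (fun d p => d.modify p.2 [] (fun l => l ++ [p.1])) PySem.Dict.empty
  -- sorted(groups.items()) compares (rank, list) tuples; dict keys are unique, so the
  -- comparison is decided by the rank component alone
  ((PySem.List.sorted groups.items (fun p => p.1)).filter (fun p => p.2.length > 1)).map
    (fun p => (p.1, PySem.List.sorted p.2 (fun t => t)))

-- ===== PORT B =====
-- Source B's run-merging step: append the team to the last run if it has the same rank,
-- else start a new run at the end (runs[-1] is reached by structural recursion)
def runsPush : List (Int × List String) → String → Int → List (Int × List String)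
  | [], t, r => [(r, [t])]
  | [g], t, r => if g.1 == r then [(g.1, g.2 ++ [t])] else [g, (r, [t])]
  | g :: gs, t, r => g :: runsPush gs t r

def tied_rank_groups_alt (ranks_by_team : List (String × Int)) : List (Int × List String) :=
  let by_rank := PySem.List.sorted ranks_by_team (fun kv => kv.2)
  let runs := by_rank.foldl (fun runs p => runsPush runs p.1 p.2) []
  runs.foldl
    (fun out g =>
      let teams := PySem.List.sorted g.2 (fun t => t)
      if teams.length > 1 then out ++ [(g.1, teams)] else out) []

-- ===== PRECONDITION & SPEC =====
def Spec_tied_rank_groups (ranks_by_team : List (String × Int)) (out : List (Int × List String)) : Prop := out = tied_rank_groups_alt ranks_by_team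
instance (ranks_by_team : List (String × Int)) (out : List (Int × List String)) : Decidable (Spec_tied_rank_groups ranks_by_team out) := by unfold Spec_tied_rank_groups; infer_instance

-- ===== CLAIM (what is proved, stated in full; the proofs are below) =====
def Claim_equal_tied_rank_groups : Prop := ∀ (ranks_by_team : List (String × Int)), Dom_tied_rank_groups ranks_by_team → Spec_tied_rank_groups ranks_by_team (tied_rank_groups ranks_by_team)

-- ===== LEMMAS AND PROOFS =====

-- the teams of rank r, in list order
def pvBucket (xs : List (String × Int)) (r : Int) : List String :=
  (xs.filter (fun p => p.2 == r)).map Prod.fst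

-- the distinct ranks, ascending
def pvRanks (xs : List (String × Int)) : List Int :=
  PySem.List.sorted (PySem.Set.ofList (xs.map (fun p => p.2))) (fun x => x)

-- the canonical value both programs compute
def pvCanon (xs : List (String × Int)) : List (Int × List String) :=
  ((pvRanks xs).filter (fun r => (pvBucket xs r).length > 1)).map
    (fun r => (r, PySem.List.sorted (pvBucket xs r) (fun t => t)))

-- B's first loop as a function (proof-side abbreviation of the fold in port B)
def pvRF (l : List (String × Int)) : List (Int × List String) :=
  l.foldl (fun runs p => runsPush runs p.1 p.2) []

theorem swapFold (xs : List (String × Int)) :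
    (List.foldl (fun d p => d.modify p.2 [] (fun l => l ++ [p.1])) (PySem.Dict.empty : PySem.Dict Int (List String)) xs)
      = List.foldl (fun d q => d.modify q.1 [] (fun l => l ++ [q.2])) PySem.Dict.empty (xs.map Prod.swap) := by
  rw [List.foldl_map]
  simp only [Prod.fst_swap, Prod.snd_swap]


theorem items_char (xs : List (String × Int)) :
    (List.foldl (fun d p => d.modify p.2 [] (fun l => l ++ [p.1])) (PySem.Dict.empty : PySem.Dict Int (List String)) xs).items
      = (PySem.Set.ofList (xs.map (fun p => p.2))).map (fun r => (r, pvBucket xs r)) := by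
  have hnd : (List.foldl (fun d p => d.modify p.2 [] (fun l => l ++ [p.1])) (PySem.Dict.empty : PySem.Dict Int (List String)) xs).keys.Nodup := by
    rw [swapFold]; exact PySem.Dict.nodup_keys_foldl_modify_key _ _ _ _ _ (by simp)
  have hkeys : (List.foldl (fun d p => d.modify p.2 [] (fun l => l ++ [p.1])) (PySem.Dict.empty : PySem.Dict Int (List String)) xs).keys
      = PySem.Set.ofList (xs.map (fun p => p.2)) := by
    rw [swapFold, PySem.Dict.keys_foldl_modify_key (xs.map Prod.swap) (fun q => q.1) [] (fun _ q l => l ++ [q.2])]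
    simp [PySem.Dict.keys_empty, List.map_map, Function.comp_def]
    rfl
  have hget : ∀ c, (List.foldl (fun d p => d.modify p.2 [] (fun l => l ++ [p.1])) (PySem.Dict.empty : PySem.Dict Int (List String)) xs).getD c []
      = pvBucket xs c := by
    intro c
    rw [swapFold, PySem.Dict.getD_foldl_modify_append]
    simp [pvBucket, List.filter_map, Function.comp_def]
  rw [PySem.Dict.items_eq_map_keys _ hnd [], hkeys]
  exact List.map_congr_left (fun r _ => by rw [hget r])


theorem sorted_items (xs : List (String × Int)) :
    PySem.List.sorted ((PySem.Set.ofList (xs.map (fun p => p.2))).map (fun r => (r, pvBucket xs r))) (fun p => p.1)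
      = (pvRanks xs).map (fun r => (r, pvBucket xs r)) := by
  apply PySem.List.sorted_eq_of_perm_of_pairwise_lt
  · exact (PySem.List.sorted_perm _ _ _).map _
  · exact List.pairwise_map.mpr (PySem.List.sorted_ofList_pairwise_lt _)


theorem A_eq_canon (xs : List (String × Int)) : tied_rank_groups xs = pvCanon xs := by
  show ((PySem.List.sorted (List.foldl (fun d p => d.modify p.2 [] (fun l => l ++ [p.1])) (PySem.Dict.empty : PySem.Dict Int (List String)) xs).items (fun p => p.1)).filter (fun p => p.2.length > 1)).map (fun p => (p.1, PySem.List.sorted p.2 (fun t => t))) = pvCanon xs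
  rw [items_char, sorted_items]
  unfold pvCanon
  simp [List.filter_map, List.map_map, Function.comp_def]

theorem pvRF_append (l : List (String × Int)) (p : String × Int) :
    pvRF (l ++ [p]) = runsPush (pvRF l) p.1 p.2 := by
  simp [pvRF, List.foldl_append]


theorem runsPush_concat (gs : List (Int × List String)) (g : Int × List String) (t : String) (r : Int) :
    runsPush (gs ++ [g]) t r
      = if g.1 == r then gs ++ [(g.1, g.2 ++ [t])] else gs ++ [g, (r, [t])] := by
  induction gs with
  | nil => simp [runsPush]
  | cons a gs ih =>
    have h : a :: gs ++ [g] = a :: (gs ++ [g]) := by simp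
    rw [h]
    cases hgs : gs ++ [g] with
    | nil => simp at hgs
    | cons b bs =>
      rw [show runsPush (a :: b :: bs) t r = a :: runsPush (b :: bs) t r from rfl, ← hgs, ih]
      split <;> simp


theorem pvBucket_append (l : List (String × Int)) (t : String) (r r' : Int) :
    pvBucket (l ++ [(t, r)]) r' = pvBucket l r' ++ if r' = r then [t] else [] := by
  simp [pvBucket, List.filter_append]
  split
  · next h => subst h; simp
  · next h => simp [show ¬ (r == r') from by simpa using fun e => h e.symm]


theorem runsFold_spec (l : List (String × Int)) (hs : l.Pairwise (fun a b => a.2 ≤ b.2)) :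
    pvRF l = ((pvRF l).map Prod.fst).map (fun r => (r, pvBucket l r))
    ∧ ((pvRF l).map Prod.fst).Pairwise (· < ·)
    ∧ ∀ x : Int, x ∈ (pvRF l).map Prod.fst ↔ x ∈ l.map (fun p => p.2) := by
  induction l using List.reverseRecOn with
  | nil => simp [pvRF]
  | append_singleton l p ih =>
    obtain ⟨t, r⟩ := p
    have hl : l.Pairwise (fun a b => a.2 ≤ b.2) := (List.pairwise_append.mp hs).1
    have hle : ∀ a ∈ l, a.2 ≤ r := by
      intro a ha
      simpa using (List.pairwise_append.mp hs).2.2 a ha (t, r) (by simp)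
    obtain ⟨ihC1, ihC2, ihC3⟩ := ih hl
    rw [pvRF_append]
    rcases List.eq_nil_or_concat (pvRF l) with hnil | ⟨gs, g, hgg⟩
    · have hl0 : l = [] := by
        have hm : l.map (fun p => p.2) = [] := by
          rw [List.eq_nil_iff_forall_not_mem]
          intro x hx
          have := (ihC3 x).mpr hx
          rw [hnil] at this; simp at this
        exact List.map_eq_nil_iff.mp hm
      subst hl0
      simp [hnil, runsPush, pvBucket]
    · rw [hgg] at ihC1 ihC2 ihC3 ⊢
      simp only [List.concat_eq_append] at ihC1 ihC2 ihC3 ⊢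
      rw [runsPush_concat]
      simp only [List.map_append, List.map_cons, List.map_nil] at ihC1 ihC2 ihC3 ⊢
      have hinj := List.append_inj ihC1 (by simp)
      have hgsF : gs = (gs.map Prod.fst).map (fun r' => (r', pvBucket l r')) := hinj.1
      have hgF : g = (g.1, pvBucket l g.1) := by
        have := hinj.2; simpa using this
      have hgsLt : ∀ r' ∈ gs.map Prod.fst, r' < g.1 := by
        intro r' hr'
        have := (List.pairwise_append.mp ihC2).2.2 r' hr' g.1 (by simp)
        exact this
      have hmemle : ∀ x ∈ l.map (fun p => p.2), x ≤ g.1 := by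
        intro x hx
        rcases (by simpa using (ihC3 x).mpr hx : x ∈ gs.map Prod.fst ∨ x = g.1) with h | h
        · exact le_of_lt (hgsLt x h)
        · exact le_of_eq h
      by_cases hgr : g.1 = r
      · subst hgr
        rw [if_pos (by simp)]
        refine ⟨?_, by simpa using ihC2, ?_⟩
        · simp only [List.map_append, List.map_cons, List.map_nil]
          congr 1
          · rw [List.map_congr_left
              (fun r' hr' => show (r', pvBucket (l ++ [(t, g.1)]) r') = (r', pvBucket l r') from by
                rw [pvBucket_append, if_neg (ne_of_lt (hgsLt r' hr')), List.append_nil])]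
            exact hgsF
          · have hg2 : g.2 = pvBucket l g.1 := by rw [hgF]
            rw [pvBucket_append, if_pos rfl, hg2]
        · intro x
          have h3 := ihC3 x
          simp only [List.mem_append, List.mem_singleton] at h3
          simp only [List.map_append, List.map_cons, List.map_nil, List.mem_append,
            List.mem_singleton]
          tauto
      · have hlt : g.1 < r := by
          have hm : g.1 ∈ l.map (fun p => p.2) := (ihC3 g.1).mp (by simp)
          rcases List.mem_map.mp hm with ⟨a, ha, he⟩
          exact lt_of_le_of_ne (he ▸ hle a ha) hgr
        have hltall : ∀ x ∈ l.map (fun p => p.2), x < r := fun x hx =>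
          lt_of_le_of_lt (hmemle x hx) hlt
        have hbr : pvBucket l r = [] := by
          simp only [pvBucket, List.map_eq_nil_iff, List.filter_eq_nil_iff]
          intro a ha
          simp only [beq_iff_eq]
          exact ne_of_lt (hltall a.2 (List.mem_map.mpr ⟨a, ha, rfl⟩))
        have hlem : ∀ r' ∈ List.map Prod.fst gs ++ [g.1], r' < r := by
          intro r' hr'
          rcases List.mem_append.mp hr' with h | h
          · exact lt_trans (hgsLt r' h) hlt
          · simp at h; exact h ▸ hlt
        rw [if_neg (by simpa using hgr)]
        have hsplit : gs ++ [g, (r, [t])] = (gs ++ [g]) ++ [(r, [t])] := by simp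
        rw [hsplit]
        refine ⟨?_, ?_, ?_⟩
        · simp only [List.map_append, List.map_cons, List.map_nil, List.append_assoc]
          have e1 : List.map (fun r' => (r', pvBucket (l ++ [(t, r)]) r')) (List.map Prod.fst gs) = gs := by
            rw [List.map_congr_left
              (fun r' hr' => show (r', pvBucket (l ++ [(t, r)]) r') = (r', pvBucket l r') from by
                rw [pvBucket_append, if_neg (ne_of_lt (hlem r' (by simp [hr']))), List.append_nil])]
            exact hgsF.symm
          have e2 : pvBucket (l ++ [(t, r)]) g.1 = g.2 := by
            rw [pvBucket_append, if_neg hgr, List.append_nil]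
            exact (congrArg Prod.snd hgF).symm
          have e3 : pvBucket (l ++ [(t, r)]) r = [t] := by
            rw [pvBucket_append, if_pos rfl, hbr]; simp
          rw [e1, e2, e3]
        · simp only [List.map_append, List.map_cons, List.map_nil]
          rw [List.pairwise_append]
          refine ⟨by simpa using ihC2, by simp, ?_⟩
          intro r' hr' y hy
          simp only [List.mem_singleton] at hy
          subst hy
          exact hlem r' (by simpa using hr')
        · intro x
          have h3 := ihC3 x
          simp only [List.mem_append, List.mem_singleton] at h3
          simp only [List.map_append, List.map_cons, List.map_nil, List.mem_append,
            List.mem_singleton]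
          tauto


theorem B_eq_canon (xs : List (String × Int)) : tied_rank_groups_alt xs = pvCanon xs := by
  have spec := runsFold_spec (PySem.List.sorted xs (fun kv => kv.2))
    (PySem.List.sorted_pairwise xs (fun kv => kv.2))
  obtain ⟨c1, c2, c3⟩ := spec
  have hndR : ((pvRF (PySem.List.sorted xs (fun kv => kv.2))).map Prod.fst).Nodup :=
    c2.imp (fun h => ne_of_lt h)
  have hmem2 : ∀ a : Int, a ∈ (PySem.List.sorted xs (fun kv => kv.2)).map (fun p => p.2)
      ↔ a ∈ xs.map (fun p => p.2) := fun a =>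
    ((PySem.List.sorted_perm xs (fun kv => kv.2) false).map (fun p => p.2)).mem_iff
  have hR : pvRanks xs = (pvRF (PySem.List.sorted xs (fun kv => kv.2))).map Prod.fst := by
    apply PySem.List.sorted_eq_of_perm_of_pairwise_lt
    · exact (List.perm_ext_iff_of_nodup hndR (PySem.Set.nodup_ofList _)).mpr
        (fun a => by rw [c3 a, hmem2 a, PySem.Set.mem_ofList])
    · exact c2
  have hfold : ∀ (gs : List (Int × List String)),
      gs.foldl (fun out g =>
        let teams := PySem.List.sorted g.2 (fun t => t)
        if teams.length > 1 then out ++ [(g.1, teams)] else out) []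
      = (gs.filter (fun g => decide ((PySem.List.sorted g.2 (fun t => t)).length > 1))).map
          (fun g => (g.1, PySem.List.sorted g.2 (fun t => t))) := by
    intro gs
    have h := PySem.List.foldl_append_if
      (fun g : Int × List String => decide ((PySem.List.sorted g.2 (fun t => t)).length > 1))
      (fun g : Int × List String => (g.1, PySem.List.sorted g.2 (fun t => t))) gs []
    simpa using h
  have hperm : ∀ r, (pvBucket (PySem.List.sorted xs (fun kv => kv.2)) r).Perm (pvBucket xs r) :=
    fun r => ((PySem.List.sorted_perm xs (fun kv => kv.2) false).filter _).map _
  have hsorteq : ∀ r, PySem.List.sorted (pvBucket (PySem.List.sorted xs (fun kv => kv.2)) r) (fun t => t)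
      = PySem.List.sorted (pvBucket xs r) (fun t => t) := fun r =>
    PySem.List.sorted_eq_sorted_of_perm _ _ _ Function.injective_id (hperm r)
  have hlen : ∀ r, (PySem.List.sorted (pvBucket (PySem.List.sorted xs (fun kv => kv.2)) r) (fun t => t)).length
      = (pvBucket xs r).length := by
    intro r; rw [hsorteq r, PySem.List.length_sorted]
  show (pvRF (PySem.List.sorted xs (fun kv => kv.2))).foldl
      (fun out g =>
        let teams := PySem.List.sorted g.2 (fun t => t)
        if teams.length > 1 then out ++ [(g.1, teams)] else out) [] = pvCanon xs
  rw [hfold, c1]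
  rw [List.filter_map, List.map_map]
  unfold pvCanon
  rw [hR]
  rw [List.filter_congr (fun r _ => show _ = decide ((pvBucket xs r).length > 1) from by
    simp only [Function.comp_apply]
    rw [hlen r])]
  apply List.map_congr_left
  intro r _
  simp only [Function.comp_apply]
  rw [hsorteq r]

-- ===== VERDICT (by name: the statement is the Claim_ definition above) =====
theorem tied_rank_groups_spec : Claim_equal_tied_rank_groups := by
  intro xs _
  unfold Spec_tied_rank_groups
  rw [A_eq_canon, B_eq_canon]
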